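-- pv_equiv track=rewrite | github.com/siddharth997-png/OCR | main.py | findAwb
-- ===== SOURCE A (Python) =====
-- def findAwb(text):
--     i =  text.find("AWB")
--     if i == -1:
--         return "Not Found"
--     awb_start = False
--     awb = ""
--     while i < len(text):
--         if(text[i].isnumeric() == False and awb_start == True):
--             break
--
--         if(text[i].isnumeric() and awb_start == False):
--             awb_start = True
--
--         if(awb_start == True):
--             awb = awb  + text[i]
--
--         i = i + 1
--     return awb
-- ===== SOURCE B (Python) =====
-- DIGITS = "0123456789"
--
-- def findAwb(text):
--     i = text.find("AWB")
--     if i == -1: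
--         return "Not Found"
--     # positional search: earliest occurrence of any digit at or after i
--     hits = [j for j in (text.find(d, i) for d in DIGITS) if j != -1]
--     if not hits:
--         return ""
--     j = min(hits)
--     rest = text[j:]
--     k = len(rest) - len(rest.lstrip(DIGITS))
--     return rest[:k]
-- ===== Notes on version B (the rewrite author's own statement) =====
-- stated objective: alternative
-- what changed: Replaces A's stateful character-by-character while loop (flag, accumulator, break) by positional arithmetic on string primitives: ten str.find(d, i) calls plus min() locate the first digit at or after the found marker, and the digit run is cut out by slicing with len(rest) - len(rest.lstrip(digits)) - no explicit scan loop at all.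
import Mathlib
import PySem

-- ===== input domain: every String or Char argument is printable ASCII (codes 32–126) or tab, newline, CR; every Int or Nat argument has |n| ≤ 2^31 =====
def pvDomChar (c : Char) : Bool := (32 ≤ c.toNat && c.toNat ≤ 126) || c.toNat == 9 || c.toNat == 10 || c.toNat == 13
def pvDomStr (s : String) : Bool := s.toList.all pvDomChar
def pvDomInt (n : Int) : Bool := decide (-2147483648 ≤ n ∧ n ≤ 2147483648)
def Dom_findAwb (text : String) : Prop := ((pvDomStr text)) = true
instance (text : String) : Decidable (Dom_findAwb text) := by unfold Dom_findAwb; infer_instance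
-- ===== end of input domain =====

-- B replaces A's stateful character-scanning while loop (awb_start flag, accumulator, break) by
-- positional arithmetic on string primitives: ten find(d, i) calls plus min locate the first digit
-- at or after "AWB", and the digit run is cut out by slicing with len(rest) - len(rest.lstrip(digits)).

-- ===== PORT A =====
-- A's while loop over index i, carried as recursion over the suffix of text starting at the
-- first occurrence of "AWB", with the same awb_start/awb state (text[i].isnumeric() is
-- Chars.isdigit, exact on the ASCII domain).
def findAwbLoop (cs : List Char) (awb_start : Bool) (awb : List Char) : List Char :=
  match cs with
  | [] => awb
  | c :: rest =>
    if PySem.Chars.isdigit c = false && awb_start then awb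
    else
      let awb_start := if PySem.Chars.isdigit c && !awb_start then true else awb_start
      let awb := if awb_start then awb ++ [c] else awb
      findAwbLoop rest awb_start awb

def findAwb (text : String) : String :=
  let i := PySem.Str.find text "AWB"
  if i = -1 then "Not Found"
  else String.ofList (findAwbLoop (text.toList.drop i.toNat) false [])


-- ===== PORT B =====
-- B: ten positional single-char searches + min, then lstrip-length slicing.
def pyDigits : List Char := ['0','1','2','3','4','5','6','7','8','9']

def findAwb_alt (text : String) : String :=
  let i := PySem.Str.find text "AWB"
  if i = -1 then "Not Found"
  else
    let hits := (pyDigits.map (fun d => PySem.Str.findFrom text (String.ofList [d]) i)).filter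
      (fun j => decide (j ≠ -1))
    if hits = [] then ""
    else
      match PySem.List.min? hits (fun x => x) with
      | none => ""
      | some j =>
        let rest := PySem.Str.slice text (some j) none
        let stripped := rest.toList.dropWhile (fun c => pyDigits.contains c)
        PySem.Str.slice rest none (some ((rest.toList.length : Int) - stripped.length))


-- ===== PRECONDITION & SPEC =====
def Spec_findAwb (text : String) (out : String) : Prop := out = findAwb_alt text
instance (text : String) (out : String) : Decidable (Spec_findAwb text out) := by unfold Spec_findAwb; infer_instance

-- ===== CLAIM (what is proved, stated in full; the proofs are below) =====
def Claim_equal_findAwb : Prop := ∀ (text : String), Dom_findAwb text → Spec_findAwb text (findAwb text)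

-- ===== LEMMAS AND PROOFS =====

lemma prefix_singleton_iff (d : Char) (l : List Char) : [d] <+: l ↔ l.head? = some d := by
  constructor
  · rintro ⟨t, rfl⟩; rfl
  · intro h; cases l with
    | nil => simp at h
    | cons a t => simp at h; subst h; exact ⟨t, rfl⟩

lemma prefix_getElem? {l1 l2 : List Char} (h : l1 <+: l2) (i : Nat) (hi : i < l1.length) :
    l2[i]? = l1[i]? := by
  rw [List.prefix_iff_eq_take.mp h]; simp [hi]

lemma dropWhile_eq_drop {α : Type} (p : α → Bool) (l : List α) :
    l.dropWhile p = l.drop (l.takeWhile p).length := by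
  induction l with
  | nil => rfl
  | cons a t ih => by_cases h : p a <;> simp [List.takeWhile_cons, h, ih]

lemma take_takeWhile {α : Type} (p : α → Bool) (l : List α) :
    l.take (l.takeWhile p).length = l.takeWhile p :=
  (List.prefix_iff_eq_take.mp (List.takeWhile_prefix p)).symm

lemma mem_pyDigits (c : Char) : c ∈ pyDigits ↔ ('0' ≤ c ∧ c ≤ '9') := by
  constructor
  · intro h; fin_cases h <;> exact ⟨by decide, by decide⟩
  · rintro ⟨h1, h2⟩
    have l1 : 48 ≤ c.toNat := h1
    have l2 : c.toNat ≤ 57 := h2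
    have : c.toNat = 48 ∨ c.toNat = 49 ∨ c.toNat = 50 ∨ c.toNat = 51 ∨ c.toNat = 52 ∨
        c.toNat = 53 ∨ c.toNat = 54 ∨ c.toNat = 55 ∨ c.toNat = 56 ∨ c.toNat = 57 := by omega
    have hc : c = Char.ofNat c.toNat := (Char.ofNat_toNat c).symm
    rcases this with h|h|h|h|h|h|h|h|h|h <;> rw [h] at hc <;> subst hc <;> decide

lemma mem_pyDigits_iff (c : Char) : pyDigits.contains c = PySem.Chars.isdigit c := by
  by_cases hd : '0' ≤ c ∧ c ≤ '9'
  · have := (mem_pyDigits c).mpr hd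
    simp [PySem.Chars.isdigit, hd.1, hd.2, this]
  · have : c ∉ pyDigits := fun h => hd ((mem_pyDigits c).mp h)
    simp [PySem.Chars.isdigit, this]
    intro h1; by_contra hlt; exact hd ⟨h1, not_lt.mp hlt⟩

lemma isdigit_mem_pyDigits {c : Char} (h : PySem.Chars.isdigit c = true) : c ∈ pyDigits := by
  simp [PySem.Chars.isdigit] at h; exact (mem_pyDigits c).mpr h

lemma digits_are_digits : ∀ d ∈ pyDigits, PySem.Chars.isdigit d = true := by
  intro d hd; fin_cases hd <;> decide

-- the first occurrence of a digit char is not before the non-digit prefix ends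
lemma find_digit_ge (tl : List Char) (d : Char) (hd : PySem.Chars.isdigit d = true)
    (h0 : 0 ≤ PySem.Chars.find tl [d]) :
    ((tl.takeWhile (fun c => !PySem.Chars.isdigit c)).length : Int) ≤ PySem.Chars.find tl [d] := by
  by_contra hlt
  push_neg at hlt
  have hf := (PySem.Chars.find_spec h0).1
  have hfp : (PySem.Chars.find tl [d]).toNat <
      (tl.takeWhile (fun c => !PySem.Chars.isdigit c)).length := by omega
  have h1 : tl[(PySem.Chars.find tl [d]).toNat]? = some d := by
    have := (prefix_singleton_iff d _).mp hf
    rwa [List.head?_drop] at this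
  have h2 : (tl.takeWhile (fun c => !PySem.Chars.isdigit c))[(PySem.Chars.find tl [d]).toNat]? = some d := by
    rw [← prefix_getElem? (List.takeWhile_prefix _) _ hfp]; exact h1
  have h3 : d ∈ tl.takeWhile (fun c => !PySem.Chars.isdigit c) := by
    exact List.mem_of_getElem? h2
  have := List.mem_takeWhile_imp h3
  simp [hd] at this

-- if the tail has no digit, no digit char occurs there
lemma no_digit_find (tl : List Char)
    (hnil : tl.dropWhile (fun c => !PySem.Chars.isdigit c) = []) (d : Char)
    (hd : PySem.Chars.isdigit d = true) : PySem.Chars.find tl [d] = -1 := by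
  by_contra hne
  have h0 : 0 ≤ PySem.Chars.find tl [d] := by
    have := PySem.Chars.neg_one_le_find tl [d]; omega
  have hf := (PySem.Chars.find_spec h0).1
  have h1 : tl[(PySem.Chars.find tl [d]).toNat]? = some d := by
    have := (prefix_singleton_iff d _).mp hf
    rwa [List.head?_drop] at this
  have h2 : d ∈ tl := List.mem_of_getElem? h1
  have := (List.dropWhile_eq_nil_iff.mp hnil) d h2
  simp [hd] at this

-- the head of the non-empty digit tail is found exactly at the non-digit prefix length
lemma find_head_eq (tl : List Char)
    (hne : tl.dropWhile (fun c => !PySem.Chars.isdigit c) ≠ []) :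
    PySem.Chars.isdigit ((tl.dropWhile (fun c => !PySem.Chars.isdigit c)).head hne) = true ∧
    PySem.Chars.find tl [(tl.dropWhile (fun c => !PySem.Chars.isdigit c)).head hne] =
      ((tl.takeWhile (fun c => !PySem.Chars.isdigit c)).length : Int) := by
  have hD : PySem.Chars.isdigit ((tl.dropWhile (fun c => !PySem.Chars.isdigit c)).head hne) = true := by
    have := List.head_dropWhile_not (fun c => !PySem.Chars.isdigit c) hne
    simpa using this
  refine ⟨hD, ?_⟩
  set d0 := (tl.dropWhile (fun c => !PySem.Chars.isdigit c)).head hne with hd0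
  set p := (tl.takeWhile (fun c => !PySem.Chars.isdigit c)).length with hp
  have hdw : tl.dropWhile (fun c => !PySem.Chars.isdigit c) = tl.drop p := dropWhile_eq_drop _ tl
  have hpre : [d0] <+: tl.drop p := by
    rw [prefix_singleton_iff, List.head?_drop, ← List.head?_drop (l := tl) (i := p), ← hdw]
    exact List.head?_eq_head hne
  have hinf : [d0] <:+: tl := by
    rcases hpre with ⟨t2, ht2⟩
    exact ⟨tl.take p, t2, by rw [List.append_assoc, ht2]; exact List.take_append_drop p tl⟩
  have h0 : 0 ≤ PySem.Chars.find tl [d0] := (PySem.Chars.find_nonneg_iff tl [d0]).mpr hinf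
  have hmin := (PySem.Chars.find_spec h0).2
  have hle : PySem.Chars.find tl [d0] ≤ (p : Int) := by
    by_contra hgt
    push_neg at hgt
    exact (hmin p (by omega)) hpre
  have hge := find_digit_ge tl d0 hD h0
  omega

-- findFrom over the digit list shifts the tail finds by k
lemma hits_eq (t : List Char) (k : Nat) (hk : k ≤ t.length) (ds : List Char) :
    ((ds.map (fun d => PySem.Chars.findFrom t [d] (k : Int))).filter (fun j => !decide (j = -1)))
      = ((ds.map (fun d => PySem.Chars.find (t.drop k) [d])).filter
          (fun j => !decide (j = -1))).map (fun x => (k : Int) + x) := by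
  induction ds with
  | nil => rfl
  | cons d ds ih =>
    rw [List.map_cons, List.map_cons]
    rw [PySem.Chars.findFrom_natCast t [d] k hk]
    by_cases h : PySem.Chars.find (t.drop k) [d] = -1
    · simp [h, ih]
    · have h0 : 0 ≤ PySem.Chars.find (t.drop k) [d] := by
        have := PySem.Chars.neg_one_le_find (t.drop k) [d]; omega
      have : ((k : Int) + PySem.Chars.find (t.drop k) [d]) ≠ -1 := by omega
      simp [h, this, ih]

lemma findAwbLoop_started (cs : List Char) (awb : List Char) :
    findAwbLoop cs true awb = awb ++ cs.takeWhile (fun c => PySem.Chars.isdigit c) := by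
  induction cs generalizing awb with
  | nil => simp [findAwbLoop]
  | cons c rest ih =>
    by_cases h : PySem.Chars.isdigit c
    · simp [findAwbLoop, h, ih]
    · simp [findAwbLoop, h]

lemma findAwbLoop_unstarted (cs : List Char) :
    findAwbLoop cs false [] =
      (cs.dropWhile (fun c => !PySem.Chars.isdigit c)).takeWhile (fun c => PySem.Chars.isdigit c) := by
  induction cs with
  | nil => simp [findAwbLoop]
  | cons c rest ih =>
    by_cases h : PySem.Chars.isdigit c
    · simp [findAwbLoop, h, findAwbLoop_started]
    · simp [findAwbLoop, h, ih]


lemma decide_mem_pyDigits : (fun c => decide (c ∈ pyDigits)) = (fun c => PySem.Chars.isdigit c) := by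
  funext c
  rw [← mem_pyDigits_iff]
  simp [List.contains_iff_mem]

lemma contains_pyDigits_fun : (fun c => pyDigits.contains c) = (fun c => PySem.Chars.isdigit c) := by
  funext c; rw [mem_pyDigits_iff]

lemma final_list (t : List Char) (k : Nat) :
    ((t.drop k).dropWhile (fun c => !PySem.Chars.isdigit c)).takeWhile (fun c => PySem.Chars.isdigit c)
      = (let x := PySem.List.slice t (some ((k + (((t.drop k).takeWhile (fun c => !PySem.Chars.isdigit c)).length) : Nat) : Int)) none
         PySem.List.slice x none (some ((x.length : Int) - (x.dropWhile (fun c => decide (c ∈ pyDigits))).length))) := by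
  set D := fun c => PySem.Chars.isdigit c with hD
  set p := ((t.drop k).takeWhile (fun c => !D c)).length with hp
  have hrest : PySem.List.slice t (some ((k + p : Nat) : Int)) none = (t.drop k).drop p := by
    rw [PySem.List.slice_from t (by positivity), Int.toNat_natCast, List.drop_drop]
  simp only [hrest]
  set x := (t.drop k).drop p with hx
  have hxd : x.dropWhile (fun c => decide (c ∈ pyDigits)) = x.dropWhile D := by
    rw [decide_mem_pyDigits]
  have hfold : (t.drop k).dropWhile (fun c => !D c) = x := by
    rw [dropWhile_eq_drop, ← hp, hx]
  clear_value x
  have hlen : ((x.length : Int) - (x.dropWhile D).length) = ((x.takeWhile D).length : Int) := by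
    have h1 : x.dropWhile D = x.drop (x.takeWhile D).length := dropWhile_eq_drop D x
    have h2 : (x.takeWhile D).length ≤ x.length := (List.takeWhile_prefix D).length_le
    have h3 : (x.drop (x.takeWhile D).length).length = x.length - (x.takeWhile D).length :=
      List.length_drop
    rw [h1, h3]
    push_cast
    omega
  rw [hxd, hlen, PySem.List.slice_to x (by positivity), Int.toNat_natCast, take_takeWhile, hfold]

lemma findAwb_eq_alt (text : String) : findAwb text = findAwb_alt text := by
  unfold findAwb findAwb_alt
  by_cases h : PySem.Str.find text "AWB" = -1
  · simp only [h, reduceIte]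
  · simp only [h, if_false]
    have hfind : PySem.Str.find text "AWB" = PySem.Chars.find text.toList ("AWB".toList) := by
      simp
    have hge : 0 ≤ PySem.Chars.find text.toList "AWB".toList := by
      have := PySem.Chars.neg_one_le_find text.toList "AWB".toList
      rw [hfind] at h; omega
    have hk : (PySem.Str.find text "AWB").toNat ≤ text.toList.length := by
      have := PySem.Chars.find_le_length text.toList "AWB".toList
      rw [hfind]; omega
    have hcast : (PySem.Str.find text "AWB") = (((PySem.Str.find text "AWB").toNat : Nat) : Int) := by
      rw [hfind]; omega
    rw [hcast]
    have hhits : (pyDigits.map (fun d => PySem.Str.findFrom text (String.ofList [d])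
          (((PySem.Str.find text "AWB").toNat : Nat) : Int))).filter (fun j => decide (j ≠ -1))
        = ((pyDigits.map (fun d =>
              PySem.Chars.find (text.toList.drop (PySem.Str.find text "AWB").toNat) [d])).filter
            (fun j => !decide (j = -1))).map
            (fun x => (((PySem.Str.find text "AWB").toNat : Nat) : Int) + x) := by
      simp only [ne_eq, decide_not, PySem.Str.findFrom_eq, String.toList_ofList]
      exact hits_eq text.toList (PySem.Str.find text "AWB").toNat hk pyDigits
    rw [hhits]
    by_cases hdw : (text.toList.drop (PySem.Str.find text "AWB").toNat).dropWhile
        (fun c => !PySem.Chars.isdigit c) = []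
    · have hfe : (pyDigits.map (fun d =>
            PySem.Chars.find (text.toList.drop (PySem.Str.find text "AWB").toNat) [d])).filter
          (fun j => !decide (j = -1)) = [] := by
        rw [List.filter_eq_nil_iff]
        intro a ha
        rcases List.mem_map.mp ha with ⟨d, hd, rfl⟩
        have hnd := no_digit_find _ hdw d (digits_are_digits d hd)
        simp only [hnd]
        simp
      rw [hfe]
      simp only [List.map_nil, reduceIte, Int.toNat_natCast]
      rw [findAwbLoop_unstarted, hdw]
      rfl
    · obtain ⟨hD0, hfind0⟩ := find_head_eq _ hdw
      have hxmem : (((((text.toList.drop (PySem.Str.find text "AWB").toNat).takeWhile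
              (fun c => !PySem.Chars.isdigit c)).length : Nat)) : Int) ∈
          (pyDigits.map (fun d =>
            PySem.Chars.find (text.toList.drop (PySem.Str.find text "AWB").toNat) [d])).filter
            (fun j => !decide (j = -1)) := by
        refine List.mem_filter.mpr ⟨List.mem_map.mpr ⟨_, isdigit_mem_pyDigits hD0, hfind0⟩, by simp⟩
      have hmem : ((((PySem.Str.find text "AWB").toNat : Nat) : Int) +
            ((((text.toList.drop (PySem.Str.find text "AWB").toNat).takeWhile
              (fun c => !PySem.Chars.isdigit c)).length : Nat) : Int)) ∈
          (List.map (fun x => (((PySem.Str.find text "AWB").toNat : Nat) : Int) + x)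
            ((pyDigits.map (fun d =>
              PySem.Chars.find (text.toList.drop (PySem.Str.find text "AWB").toNat) [d])).filter
              (fun j => !decide (j = -1)))) :=
        List.mem_map.mpr ⟨_, hxmem, rfl⟩
      have hne2 : (List.map (fun x => (((PySem.Str.find text "AWB").toNat : Nat) : Int) + x)
            ((pyDigits.map (fun d =>
              PySem.Chars.find (text.toList.drop (PySem.Str.find text "AWB").toNat) [d])).filter
              (fun j => !decide (j = -1)))) ≠ [] := by
        intro hcon; rw [hcon] at hmem; simp at hmem
      rw [if_neg hne2]
      cases hmq : PySem.List.min? (List.map (fun x => (((PySem.Str.find text "AWB").toNat : Nat) : Int) + x)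
            ((pyDigits.map (fun d =>
              PySem.Chars.find (text.toList.drop (PySem.Str.find text "AWB").toNat) [d])).filter
              (fun j => !decide (j = -1)))) (fun x => x) with
      | none => exact absurd ((PySem.List.min?_eq_none_iff _ _).mp hmq) hne2
      | some m =>
        have hm_mem := PySem.List.min?_mem hmq
        rcases List.mem_map.mp hm_mem with ⟨y, hyf, rfl⟩
        rcases List.mem_filter.mp hyf with ⟨hymap, hyne⟩
        rcases List.mem_map.mp hymap with ⟨d, hdmem, rfl⟩
        have hy0 : 0 ≤ PySem.Chars.find (text.toList.drop (PySem.Str.find text "AWB").toNat) [d] := by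
          have h5 := PySem.Chars.neg_one_le_find (text.toList.drop (PySem.Str.find text "AWB").toNat) [d]
          have hyne' : PySem.Chars.find (text.toList.drop (PySem.Str.find text "AWB").toNat) [d] ≠ -1 := by
            intro hcon
            rw [hcon] at hyne
            simp at hyne
          omega
        have hygep := find_digit_ge _ d (digits_are_digits d hdmem) hy0
        have hmle := PySem.List.min?_isMin hmq _ hmem
        have hjval : (((PySem.Str.find text "AWB").toNat : Nat) : Int) +
            PySem.Chars.find (text.toList.drop (PySem.Str.find text "AWB").toNat) [d]
            = ((((PySem.Str.find text "AWB").toNat +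
                (((text.toList.drop (PySem.Str.find text "AWB").toNat).takeWhile
                  (fun c => !PySem.Chars.isdigit c)).length)) : Nat) : Int) := by
          push_cast
          omega
        rw [hjval]
        rw [← String.toList_inj]
        simp only [String.toList_ofList, Int.toNat_natCast, findAwbLoop_unstarted,
          PySem.Str.toList_slice, PySem.Chars.slice_eq_listSlice]
        rw [final_list text.toList (PySem.Str.find text "AWB").toNat]
        simp only [decide_mem_pyDigits, contains_pyDigits_fun]

-- ===== VERDICT (by name: the statement is the Claim_ definition above) =====
theorem findAwb_spec : Claim_equal_findAwb := by
  intro text _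
  unfold Spec_findAwb
  exact findAwb_eq_alt text
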